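-- pv_equiv track=rewrite | github.com/IMaeots/Python-Taltech-course | OP/op05_lists/lists.py | number_of_phones
-- ===== SOURCE A (Python) =====
-- def number_of_phones(all_phones: str) -> list:
--     """
--     Create a list of tuples with brand quantities.
--
--     The result is a list of tuples.
--     Each tuple is in the form: (brand_name: str, quantity: int).
--     The order of the tuples (brands) is the same as the first appearance in the list.
--     """
--     if len(all_phones) < 1:
--         return []
--
--     list_of_phones = all_phones.strip().split(',')
--     quantity_dict = {}
--
--     for phone in list_of_phones:
--         phone_parts = phone.split(" ")
--         brand = phone_parts[0]
--
--         if brand in quantity_dict: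
--             quantity_dict[brand] += 1
--         else:
--             quantity_dict[brand] = 1
--
--     return [(brand, quantity) for brand, quantity in quantity_dict.items()]
-- ===== SOURCE B (Python) =====
-- def number_of_phones(all_phones: str) -> list:
--     """Partition recursion: take the first brand, count it while removing all its
--     occurrences, then recurse on the remainder (no dict needed)."""
--     if len(all_phones) < 1:
--         return []
--
--     def count_off(bs):
--         if not bs:
--             return []
--         b = bs[0]
--         rest = [x for x in bs if x != b]
--         return [(b, len(bs) - len(rest))] + count_off(rest)
--
--     return count_off([p.split(" ")[0] for p in all_phones.strip().split(",")])
-- ===== Notes on version B (the rewrite author's own statement) =====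
-- stated objective: alternative
-- what changed: Replaces the incremental dict-accumulator loop with a dict-free partition recursion: take the first brand, count it as the number of elements removed when filtering it out, and recurse on the shrinking remainder.
import Mathlib
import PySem

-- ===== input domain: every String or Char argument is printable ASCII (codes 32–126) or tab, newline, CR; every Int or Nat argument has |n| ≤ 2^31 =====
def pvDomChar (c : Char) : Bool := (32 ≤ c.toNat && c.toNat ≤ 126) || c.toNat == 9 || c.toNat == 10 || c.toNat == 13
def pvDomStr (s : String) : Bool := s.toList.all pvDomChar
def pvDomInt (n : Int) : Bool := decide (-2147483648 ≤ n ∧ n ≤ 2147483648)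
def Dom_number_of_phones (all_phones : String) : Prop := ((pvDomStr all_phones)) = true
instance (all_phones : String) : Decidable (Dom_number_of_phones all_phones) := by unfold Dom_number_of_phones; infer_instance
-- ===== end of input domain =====

-- B replaces A's dict-accumulator loop by a dict-free partition recursion (count-and-remove the first brand, recurse on the remainder); alternative structure, same results.

-- ===== PORT A =====
-- s.split(sep) for a literal nonempty sep: Str.split? is none only for sep = "", so getD is exact here
def pvSplit (s sep : String) : List String := (PySem.Str.split? s sep).getD []
-- phone.split(" ")[0]: split with a nonempty separator always yields a nonempty list, so [0] is its head
def pvBrand (phone : String) : String := (pvSplit phone " ").headD ""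

def number_of_phones (all_phones : String) : List (String × Int) :=
  if PySem.Str.len all_phones < 1 then []
  else
    let list_of_phones := pvSplit (PySem.Str.strip all_phones) ","
    let quantity_dict : PySem.Dict String Int :=
      list_of_phones.foldl (fun d phone =>
        let brand := pvBrand phone
        if d.contains brand then d.modify brand 0 (· + 1) else d.insert brand 1)
        PySem.Dict.empty
    quantity_dict.items

-- ===== PORT B =====
-- count_off(bs): take the first brand, filter out all its occurrences, emit the count dropped, recurse
def countOff : List String → List (String × Int)
  | [] => []
  | b :: t =>
    (b, ((b :: t).length : Int) - (((b :: t).filter (fun x => x ≠ b)).length : Int))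
      :: countOff ((b :: t).filter (fun x => x ≠ b))
termination_by bs => bs.length
decreasing_by
  rw [List.filter_cons_of_neg (by simp)]
  exact Nat.lt_succ_of_le (List.length_filter_le _ _)

def number_of_phones_alt (all_phones : String) : List (String × Int) :=
  if PySem.Str.len all_phones < 1 then []
  else countOff ((pvSplit (PySem.Str.strip all_phones) ",").map pvBrand)

-- ===== PRECONDITION & SPEC =====
def Spec_number_of_phones (all_phones : String) (out : List (String × Int)) : Prop := out = number_of_phones_alt all_phones
instance (all_phones : String) (out : List (String × Int)) : Decidable (Spec_number_of_phones all_phones out) := by unfold Spec_number_of_phones; infer_instance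

-- ===== CLAIM =====
def Claim_equal_number_of_phones : Prop := ∀ (all_phones : String), Dom_number_of_phones all_phones → Spec_number_of_phones all_phones (number_of_phones all_phones)

-- ===== LEMMAS AND PROOFS =====

-- A's loop body is exactly Counter's update step
lemma step_eq_modify (d : PySem.Dict String Int) (b : String) :
    (if d.contains b then d.modify b 0 (· + 1) else d.insert b 1) = d.modify b 0 (· + 1) := by
  by_cases h : d.contains b = true
  · simp [h]
  · simp only [Bool.not_eq_true] at h
    simp [h, PySem.Dict.modify, PySem.Dict.getD_of_not_contains d 0 h]

lemma fold_eq_counter (l : List String) :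
    l.foldl (fun d phone =>
        let brand := pvBrand phone
        if d.contains brand then d.modify brand 0 (· + 1) else d.insert brand 1)
      PySem.Dict.empty
      = PySem.Dict.counter (l.map pvBrand) := by
  rw [PySem.Dict.counter_eq_foldl, List.foldl_map]
  exact PySem.List.foldl_congr_mem l _ _ _ (fun d x _ => step_eq_modify d (pvBrand x))

-- adding to a set that already holds b ignores later b's: the filtered list folds the same
lemma foldl_add_filter (b : String) (l : List String) (acc : PySem.Set String) (hb : b ∈ acc) :
    l.foldl PySem.Set.add acc = (l.filter (fun x => x ≠ b)).foldl PySem.Set.add acc := by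
  induction l generalizing acc with
  | nil => rfl
  | cons x xs ih =>
    by_cases hx : x = b
    · subst hx
      have hc : PySem.Set.add acc x = acc := by
        simp [PySem.Set.add, PySem.Set.contains, hb]
      rw [List.filter_cons_of_neg (by simp), List.foldl_cons, hc]
      exact ih acc hb
    · have hmem : b ∈ PySem.Set.add acc x := by
        simp only [PySem.Set.add]
        split
        · exact hb
        · exact List.mem_append_left _ hb
      rw [List.filter_cons_of_pos (by simp [hx]), List.foldl_cons, List.foldl_cons]
      exact ih _ hmem

-- an element absent from the list and the accumulator stays in front
lemma foldl_add_cons (a : String) (l : List String) (acc : List String)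
    (ha : a ∉ acc) (hl : ∀ x ∈ l, x ≠ a) :
    l.foldl PySem.Set.add (a :: acc) = a :: l.foldl PySem.Set.add acc := by
  induction l generalizing acc with
  | nil => rfl
  | cons x xs ih =>
    have hxa : x ≠ a := hl x (by simp)
    have hcont : PySem.Set.contains (a :: acc) x = PySem.Set.contains acc x := by
      simp [PySem.Set.contains]
      exact fun h => absurd h hxa
    simp only [List.foldl_cons, PySem.Set.add, hcont]
    by_cases hc : PySem.Set.contains acc x = true
    · rw [if_pos hc, if_pos hc]
      exact ih acc ha (fun y hy => hl y (List.mem_cons_of_mem _ hy))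
    · rw [if_neg hc, if_neg hc, List.cons_append]
      refine ih (acc ++ [x]) ?_ (fun y hy => hl y (List.mem_cons_of_mem _ hy))
      simp only [List.mem_append, List.mem_singleton]
      rintro (h | h)
      · exact ha h
      · exact hxa h.symm

-- dedup of a cons: the head, then dedup of the tail with the head filtered out
lemma dedup_cons_filter (b : String) (t : List String) :
    PySem.List.dedup (b :: t) = b :: PySem.List.dedup (t.filter (fun x => x ≠ b)) := by
  show (b :: t).foldl PySem.Set.add PySem.Set.empty
      = b :: (t.filter (fun x => x ≠ b)).foldl PySem.Set.add PySem.Set.empty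
  rw [List.foldl_cons]
  have h1 : PySem.Set.add PySem.Set.empty b = [b] := rfl
  rw [h1, foldl_add_filter b t [b] (by simp)]
  exact foldl_add_cons b _ [] (by simp)
    (fun x hx => by simpa using (List.of_mem_filter hx))

-- the count of the head equals the number of elements the filter drops
lemma count_head_eq (b : String) (t : List String) :
    (((b :: t).length : Int)) - (((b :: t).filter (fun x => x ≠ b)).length : Int)
      = ((b :: t).count b : Int) := by
  have key : ∀ l : List String, ((l.filter (fun x => x ≠ b)).length + l.count b) = l.length := by
    intro l
    induction l with
    | nil => simp
    | cons y ys ih =>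
      by_cases hyb : y = b
      · subst hyb
        rw [List.filter_cons_of_neg (by simp), List.count_cons_self]
        simp only [List.length_cons]
        omega
      · rw [List.filter_cons_of_pos (by simp [hyb]), List.count_cons_of_ne hyb]
        simp only [List.length_cons]
        omega
  have h := key (b :: t)
  push_cast
  omega

-- counting a survivor of the filter in the filtered list equals counting it in the original
lemma count_filter_ne (b x : String) (l : List String) (hx : x ≠ b) :
    (l.filter (fun y => y ≠ b)).count x = l.count x := by
  unfold List.count
  rw [List.countP_filter]
  apply List.countP_congr
  intro y _
  by_cases h : y = x
  · subst h; simp [hx]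
  · simp [h]

-- the partition recursion computes dedup-with-counts
lemma countOff_eq_aux (n : Nat) : ∀ l : List String, l.length ≤ n →
    countOff l = (PySem.List.dedup l).map (fun b => (b, (l.count b : Int))) := by
  induction n with
  | zero =>
    intro l h
    have : l = [] := List.eq_nil_of_length_eq_zero (Nat.le_zero.mp h)
    subst this
    rw [countOff]
    rfl
  | succ n ih =>
    intro l h
    match l with
    | [] => rw [countOff]; rfl
    | b :: t =>
      rw [countOff]
      have hrest : (b :: t).filter (fun x => x ≠ b) = t.filter (fun x => x ≠ b) :=
        List.filter_cons_of_neg (by simp)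
      have hlen : (t.filter (fun x => x ≠ b)).length ≤ n := by
        have := List.length_filter_le (fun x => decide (x ≠ b)) t
        simp only [List.length_cons, Nat.succ_le_succ_iff] at h
        omega
      rw [dedup_cons_filter, List.map_cons, hrest, ih _ hlen]
      congr 1
      · rw [← hrest, count_head_eq]
      · apply List.map_congr_left
        intro x hx
        have hxmem : x ∈ t.filter (fun x => x ≠ b) := (PySem.List.mem_dedup _ _).mp hx
        have hxb : x ≠ b := by simpa using List.of_mem_filter hxmem
        rw [count_filter_ne b x t hxb, List.count_cons_of_ne (Ne.symm hxb)]

lemma countOff_eq (l : List String) :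
    countOff l = (PySem.List.dedup l).map (fun b => (b, (l.count b : Int))) :=
  countOff_eq_aux l.length l le_rfl

-- ===== VERDICT =====
theorem number_of_phones_spec : Claim_equal_number_of_phones := by
  intro s _
  unfold Spec_number_of_phones number_of_phones number_of_phones_alt
  by_cases h : PySem.Str.len s < 1
  · simp only [h, if_pos]
  · simp only [h, if_false]
    rw [fold_eq_counter, PySem.Dict.items_counter, countOff_eq, PySem.List.dedup_eq_ofList]
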